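-- pv_equiv track=rewrite | github.com/gyfu/forritun-2 | aefing1/aefing1.py | finnaS
-- ===== SOURCE A (Python) =====
-- def finnaS(string):
--     nyr = ""
--     for x in string:
--         if x == "s" or x == "S" or x == " ":
--             nyr += x
--         else:
--             nyr += "$"
--     return nyr
-- ===== SOURCE B (Python) =====
-- import re
--
-- def finnaS(string):
--     return re.sub(r'[^sS ]', '$', string)
-- ===== Notes on version B (the rewrite author's own statement) =====
-- stated objective: idiomatic
-- what changed: Replaced the explicit per-character loop with string concatenation by a single regex substitution that masks every character outside the kept class with a dollar sign.
import Mathlib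
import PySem

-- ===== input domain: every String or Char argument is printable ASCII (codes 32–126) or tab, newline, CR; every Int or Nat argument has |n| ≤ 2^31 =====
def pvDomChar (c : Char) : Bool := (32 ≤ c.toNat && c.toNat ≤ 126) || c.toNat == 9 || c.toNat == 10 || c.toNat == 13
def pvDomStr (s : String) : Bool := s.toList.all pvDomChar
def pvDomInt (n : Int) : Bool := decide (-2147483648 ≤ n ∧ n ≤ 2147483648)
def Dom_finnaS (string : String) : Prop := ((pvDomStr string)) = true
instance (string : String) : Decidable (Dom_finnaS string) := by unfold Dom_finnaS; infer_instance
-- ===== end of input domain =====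

-- B replaces A's per-character accumulator loop with a single regex substitution (idiomatic, same cost).


-- ===== PORT A =====
def finnaS (string : String) : String :=
  string.toList.foldl
    (fun nyr x => if x = 's' ∨ x = 'S' ∨ x = ' ' then nyr ++ String.ofList [x] else nyr ++ String.ofList ['$']) ""

-- ===== PORT B =====
-- re.sub(r'[^sS ]', '\$', string): replace every char outside {s, S, space} with '\$'
def finnaS_alt (string : String) : String :=
  String.ofList (string.toList.map (fun c => if c = 's' ∨ c = 'S' ∨ c = ' ' then c else '$'))

-- ===== PRECONDITION & SPEC =====
def Spec_finnaS (string : String) (out : String) : Prop := out = finnaS_alt string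
instance (string : String) (out : String) : Decidable (Spec_finnaS string out) := by unfold Spec_finnaS; infer_instance

-- ===== CLAIM (what is proved, stated in full; the proofs are below) =====
def Claim_equal_finnaS : Prop := ∀ (string : String), Dom_finnaS string → Spec_finnaS string (finnaS string)

-- ===== LEMMAS AND PROOFS =====

-- ===== VERDICT (by name: the statement is the Claim_ definition above) =====
theorem finnaS_fold (l : List Char) (acc : String) :
    l.foldl (fun nyr x => if x = 's' ∨ x = 'S' ∨ x = ' ' then nyr ++ String.ofList [x] else nyr ++ String.ofList ['$']) acc
      = acc ++ String.ofList (l.map (fun c => if c = 's' ∨ c = 'S' ∨ c = ' ' then c else '$')) := by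
  induction l generalizing acc with
  | nil => simp
  | cons h t ih =>
    simp only [List.foldl_cons, List.map_cons]
    by_cases hc : h = 's' ∨ h = 'S' ∨ h = ' '
    · rw [if_pos hc, if_pos hc, ih, String.append_assoc, ← String.ofList_append, List.singleton_append]
    · rw [if_neg hc, if_neg hc, ih, String.append_assoc, ← String.ofList_append, List.singleton_append]

theorem finnaS_spec : Claim_equal_finnaS := by
  intro s _
  unfold Spec_finnaS finnaS finnaS_alt
  rw [finnaS_fold]
  simp
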